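-- pv_equiv track=rewrite | github.com/nashid/vul_detect | flow_analysis/control/control_flow_analyzer.py | getCFGInfluentEdgeLines
-- ===== SOURCE A (Python) =====
-- def getCFGInfluentEdgeLines(forWardRelatedLines, CFGLineInfluence,
--                             forwardRelatedLines_final, controlFlowEdges):
--     '''get backward cfg influent lines and edges
--
--     using bfs to get forward cfg-related lines and edges
--
--     :param forWardRelatedLines:
--     :param CFGLineInfluence:
--     :param forwardRelatedLines_final:
--     :param controlFlowEdges:
--     :return:
--     '''
--     CFGInfluentLines = set()
--     queue = list()
--     queue.extend(forWardRelatedLines)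
--     visited = set()
--     visited = visited.union(forWardRelatedLines)
--     while queue:
--         fro = queue.pop(0)
--         if fro not in forwardRelatedLines_final:
--             CFGInfluentLines.add(fro)
--             forwardRelatedLines_final.add(fro)
--         if fro not in CFGLineInfluence:  # end parsing
--             continue
--         CFGLineInfluentLineSet = CFGLineInfluence[fro]
--
--         for CFGLineInfluentLine in list(CFGLineInfluentLineSet):
--             cfgEdge = str(fro) + "-" + str(CFGLineInfluentLine)
--             if cfgEdge not in controlFlowEdges:
--                 controlFlowEdges.add(cfgEdge)
--             if CFGLineInfluentLine not in visited:
--                 visited.add(CFGLineInfluentLine)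
--                 queue.append(CFGLineInfluentLine)
--
--     return CFGInfluentLines
-- ===== SOURCE B (Python) =====
-- def getCFGInfluentEdgeLines(forWardRelatedLines, CFGLineInfluence,
--                             forwardRelatedLines_final, controlFlowEdges):
--     # Pass 1: collect the BFS processing order (index pointer, no pop(0)).
--     order = list(forWardRelatedLines)
--     seen = set(forWardRelatedLines)
--     i = 0
--     while i < len(order):
--         node = order[i]
--         i += 1
--         for nb in CFGLineInfluence.get(node, ()):
--             if nb not in seen:
--                 seen.add(nb)
--                 order.append(nb)
--     # Pass 2: derive edges and influent lines from the order.
--     CFGInfluentLines = set()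
--     for node in order:
--         for nb in CFGLineInfluence.get(node, ()):
--             controlFlowEdges.add(str(node) + "-" + str(nb))
--         if node not in forwardRelatedLines_final:
--             CFGInfluentLines.add(node)
--             forwardRelatedLines_final.add(node)
--     return CFGInfluentLines
-- ===== Notes on version B (the rewrite author's own statement) =====
-- stated objective: faster
-- what changed: A's single interleaved BFS loop (queue.pop(0) with on-the-fly output updates) is split into a pointer-based pass that only collects the BFS order of reachable nodes, followed by a separate derivation pass over that order that emits the edges and the influent lines; the index pointer removes the O(n) list.pop(0).
import Mathlib
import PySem

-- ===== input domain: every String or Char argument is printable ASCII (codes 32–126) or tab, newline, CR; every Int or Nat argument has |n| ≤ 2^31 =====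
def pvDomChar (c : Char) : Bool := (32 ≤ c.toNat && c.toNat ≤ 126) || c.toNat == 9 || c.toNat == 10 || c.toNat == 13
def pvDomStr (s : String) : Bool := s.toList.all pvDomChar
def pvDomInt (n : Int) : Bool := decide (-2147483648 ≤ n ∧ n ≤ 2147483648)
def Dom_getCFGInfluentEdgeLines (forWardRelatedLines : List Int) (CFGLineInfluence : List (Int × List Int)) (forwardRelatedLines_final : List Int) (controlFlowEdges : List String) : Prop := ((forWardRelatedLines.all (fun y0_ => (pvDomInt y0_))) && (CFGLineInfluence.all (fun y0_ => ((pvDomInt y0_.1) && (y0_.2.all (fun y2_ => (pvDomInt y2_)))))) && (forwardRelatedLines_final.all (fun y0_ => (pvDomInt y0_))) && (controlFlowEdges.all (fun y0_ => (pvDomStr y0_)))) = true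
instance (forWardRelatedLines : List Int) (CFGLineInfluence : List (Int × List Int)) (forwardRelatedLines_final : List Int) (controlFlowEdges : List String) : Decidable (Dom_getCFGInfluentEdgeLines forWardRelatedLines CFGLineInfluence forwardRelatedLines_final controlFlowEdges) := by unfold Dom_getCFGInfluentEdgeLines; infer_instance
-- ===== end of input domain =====

-- B replaces A's single interleaved BFS (with O(n) queue.pop(0)) by a pointer-based
-- order-collecting pass plus a separate derivation pass over that order; equivalence is
-- about the RETURN value (both versions also perform the same set-insertions into the
-- forwardRelatedLines_final / controlFlowEdges arguments in Python).

-- ===== PORT A =====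
-- shared helper: cfgEdge = str(fro) + "-" + str(nb)
def edgeStr (a b : Int) : String := PySem.Int.toStr a ++ "-" ++ PySem.Int.toStr b

-- body of B's pass-1 inner loop: 'if nb not in seen: seen.add(nb); order.append(nb)'
-- (state = (seen, pending tail of order)); defined here because A's termination proof reuses it
def stepB (st : PySem.Set Int × List Int) (nb : Int) : PySem.Set Int × List Int :=
  if nb ∈ st.1 then st else (PySem.Set.add st.1 nb, st.2 ++ [nb])

-- body of A's inner for-loop: edge insertion + visited/queue update (state = (edges, visited, queue))
def stepA (fro : Int) (st : PySem.Set String × PySem.Set Int × List Int) (nb : Int) :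
    PySem.Set String × PySem.Set Int × List Int :=
  let s := edgeStr fro nb
  let e := if s ∈ st.1 then st.1 else PySem.Set.add st.1 s
  if nb ∈ st.2.1 then (e, st.2.1, st.2.2) else (e, PySem.Set.add st.2.1 nb, st.2.2 ++ [nb])

-- (visited, queue) component of A's inner fold is B's pass-1 fold (used by loopA's termination)
lemma foldA_proj (fro : Int) (ns : List Int) : ∀ (e : PySem.Set String) (v : PySem.Set Int) (q : List Int),
    (ns.foldl (stepA fro) (e, v, q)).2 = ns.foldl stepB (v, q) := by
  induction ns with
  | nil => intro e v q; rfl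
  | cons nb ns ih =>
    intro e v q
    simp only [List.foldl_cons, stepA, stepB]
    by_cases h : nb ∈ v <;> simp [h, ih]

-- every neighbour list returned by the dict lookup is drawn from the dict's values
lemma dictGet_mem_flatMap (d : List (Int × List Int)) (k : Int) (ns : List Int)
    (h : (PySem.Dict.mk d).get? k = some ns) : ∀ x ∈ ns, x ∈ d.flatMap Prod.snd := by
  induction d with
  | nil => simp [PySem.Dict.get?] at h
  | cons p d ih =>
    rw [show (p :: d) = ((p.1, p.2) :: d) from by simp] at h
    rw [PySem.Dict.get?_mk_cons] at h
    by_cases hk : p.1 == k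
    · simp only [hk, if_pos] at h
      intro x hx
      rw [List.mem_flatMap]
      exact ⟨p, List.mem_cons_self, by injection h with h'; rw [h']; exact hx⟩
    · simp only [hk, Bool.false_eq_true, if_neg, not_false_iff] at h
      intro x hx
      have := ih h x hx
      rw [List.mem_flatMap] at this ⊢
      obtain ⟨a, ha, hxa⟩ := this
      exact ⟨a, List.mem_cons_of_mem _ ha, hxa⟩

-- termination potential: values of the dict not yet visited
def rcard (d : List (Int × List Int)) (v : List Int) : Nat :=
  ((d.flatMap Prod.snd).toFinset \ v.toFinset).card

lemma rcard_add (d : List (Int × List Int)) (v : List Int) (nb : Int)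
    (hm : nb ∈ d.flatMap Prod.snd) (hv : nb ∉ v) :
    rcard d (PySem.Set.add v nb) + 1 = rcard d v := by
  have hadd : PySem.Set.add v nb = v ++ [nb] := PySem.Set.add_of_not_mem hv
  have hmem : nb ∈ (d.flatMap Prod.snd).toFinset \ v.toFinset := by
    simp [Finset.mem_sdiff, hm, hv]
  unfold rcard
  rw [hadd]
  have : (v ++ [nb]).toFinset = insert nb v.toFinset := by
    simp [List.toFinset_append]
  rw [this, Finset.sdiff_insert, Finset.card_erase_of_mem hmem]
  have hpos : 0 < ((d.flatMap Prod.snd).toFinset \ v.toFinset).card := Finset.card_pos.mpr ⟨nb, hmem⟩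
  omega

lemma stepB_measure (d : List (Int × List Int)) (ns : List Int)
    (h : ∀ x ∈ ns, x ∈ d.flatMap Prod.snd) :
    ∀ (v : PySem.Set Int) (q : List Int),
      (ns.foldl stepB (v, q)).2.length + 2 * rcard d (ns.foldl stepB (v, q)).1
        ≤ q.length + 2 * rcard d v := by
  induction ns with
  | nil => intro v q; simp
  | cons nb ns ih =>
    intro v q
    have hns : ∀ x ∈ ns, x ∈ d.flatMap Prod.snd := fun x hx => h x (List.mem_cons_of_mem _ hx)
    simp only [List.foldl_cons, stepB]
    by_cases hv : nb ∈ v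
    · rw [if_pos hv]
      exact ih hns v q
    · rw [if_neg hv]
      have := ih hns (PySem.Set.add v nb) (q ++ [nb])
      have hrc := rcard_add d v nb (h nb (List.mem_cons_self)) hv
      simp only [List.length_append, List.length_cons, List.length_nil] at this
      omega

-- B's pass 1: BFS order of reachable nodes; order = done ++ todo, pointer i = done.length
def loop1 (d : List (Int × List Int)) (todo : List Int) (seen : PySem.Set Int) (done : List Int) : List Int :=
  match todo with
  | [] => done
  | node :: rest =>
    let st := ((PySem.Dict.mk d).getD node []).foldl stepB (seen, rest)
    loop1 d st.2 st.1 (done ++ [node])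
termination_by todo.length + 2 * rcard d seen
decreasing_by
  cases h : (PySem.Dict.mk d).get? node with
  | none =>
    have : (PySem.Dict.mk d).getD node [] = [] := by simp [PySem.Dict.getD, h]
    simp [this]
  | some ns =>
    have hg : (PySem.Dict.mk d).getD node [] = ns := by simp [PySem.Dict.getD, h]
    have := stepB_measure d ns (dictGet_mem_flatMap d node ns h) seen rest
    rw [hg]
    simp only [List.length_cons]
    omega

-- A's while-loop: state = (queue, visited, forwardRelatedLines_final, CFGInfluentLines, controlFlowEdges)
def loopA (d : List (Int × List Int)) (queue : List Int) (visited : PySem.Set Int)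
    (finals : List Int) (out : PySem.Set Int) (edges : List String) : List Int :=
  match queue with
  | [] => out
  | fro :: rest =>
    let fo : PySem.Set Int × List Int :=
      if fro ∈ finals then (out, finals) else (PySem.Set.add out fro, PySem.Set.add finals fro)
    match h : (PySem.Dict.mk d).get? fro with
    | none => loopA d rest visited fo.2 fo.1 edges            -- 'continue'
    | some ns =>
      let st := ns.foldl (stepA fro) (edges, visited, rest)
      loopA d st.2.2 st.2.1 fo.2 fo.1 st.1
termination_by queue.length + 2 * rcard d visited
decreasing_by
  · simp
  · have hp := foldA_proj fro ns edges visited rest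
    have := stepB_measure d ns (dictGet_mem_flatMap d fro ns h) visited rest
    have h1 : (ns.foldl (stepA fro) (edges, visited, rest)).2.2 = (ns.foldl stepB (visited, rest)).2 := by rw [hp]
    have h2 : (ns.foldl (stepA fro) (edges, visited, rest)).2.1 = (ns.foldl stepB (visited, rest)).1 := by rw [hp]
    simp only [h1, h2, List.length_cons]
    omega

def getCFGInfluentEdgeLines (forWardRelatedLines : List Int) (CFGLineInfluence : List (Int × List Int)) (forwardRelatedLines_final : List Int) (controlFlowEdges : List String) : List Int :=
  -- CFGInfluentLines = set(); queue = list(); queue.extend(forWardRelatedLines);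
  -- visited = set(); visited = visited.union(forWardRelatedLines); while queue: …
  loopA CFGLineInfluence (([] : List Int) ++ forWardRelatedLines)
    (PySem.Set.union PySem.Set.empty forWardRelatedLines)
    forwardRelatedLines_final PySem.Set.empty controlFlowEdges

-- ===== PORT B =====
-- B's pass 2 body: add all edges of node, then (if new) record node in out and finals
def step2 (d : List (Int × List Int)) (st : List String × List Int × PySem.Set Int) (node : Int) :
    List String × List Int × PySem.Set Int :=
  let e := ((PySem.Dict.mk d).getD node []).foldl (fun e nb => PySem.Set.add e (edgeStr node nb)) st.1
  if node ∈ st.2.1 then (e, st.2.1, st.2.2)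
  else (e, PySem.Set.add st.2.1 node, PySem.Set.add st.2.2 node)

def getCFGInfluentEdgeLines_alt (forWardRelatedLines : List Int) (CFGLineInfluence : List (Int × List Int)) (forwardRelatedLines_final : List Int) (controlFlowEdges : List String) : List Int :=
  let order := loop1 CFGLineInfluence forWardRelatedLines (PySem.Set.ofList forWardRelatedLines) []
  (order.foldl (step2 CFGLineInfluence) (controlFlowEdges, forwardRelatedLines_final, PySem.Set.empty)).2.2

-- ===== PRECONDITION & SPEC =====
def Spec_getCFGInfluentEdgeLines (forWardRelatedLines : List Int) (CFGLineInfluence : List (Int × List Int)) (forwardRelatedLines_final : List Int) (controlFlowEdges : List String) (out : List Int) : Prop := out = getCFGInfluentEdgeLines_alt forWardRelatedLines CFGLineInfluence forwardRelatedLines_final controlFlowEdges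
instance (forWardRelatedLines : List Int) (CFGLineInfluence : List (Int × List Int)) (forwardRelatedLines_final : List Int) (controlFlowEdges : List String) (out : List Int) : Decidable (Spec_getCFGInfluentEdgeLines forWardRelatedLines CFGLineInfluence forwardRelatedLines_final controlFlowEdges out) := by unfold Spec_getCFGInfluentEdgeLines; infer_instance

-- ===== CLAIM (what is proved, stated in full; the proofs are below) =====
def Claim_equal_getCFGInfluentEdgeLines : Prop := ∀ (forWardRelatedLines : List Int) (CFGLineInfluence : List (Int × List Int)) (forwardRelatedLines_final : List Int) (controlFlowEdges : List String), Dom_getCFGInfluentEdgeLines forWardRelatedLines CFGLineInfluence forwardRelatedLines_final controlFlowEdges → Spec_getCFGInfluentEdgeLines forWardRelatedLines CFGLineInfluence forwardRelatedLines_final controlFlowEdges (getCFGInfluentEdgeLines forWardRelatedLines CFGLineInfluence forwardRelatedLines_final controlFlowEdges)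

-- ===== LEMMAS AND PROOFS =====

-- edge component of A's inner fold is B's pass-2 edge fold
lemma foldA_edge (fro : Int) (ns : List Int) : ∀ (e : PySem.Set String) (v : PySem.Set Int) (q : List Int),
    (ns.foldl (stepA fro) (e, v, q)).1 = ns.foldl (fun e nb => PySem.Set.add e (edgeStr fro nb)) e := by
  induction ns with
  | nil => intro e v q; rfl
  | cons nb ns ih =>
    intro e v q
    simp only [List.foldl_cons]
    have hA : stepA fro (e, v, q) nb
        = (PySem.Set.add e (edgeStr fro nb),
           if nb ∈ v then (v, q) else (PySem.Set.add v nb, q ++ [nb])) := by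
      unfold stepA
      by_cases hm : edgeStr fro nb ∈ e
      · simp only [hm, if_pos, PySem.Set.add_of_mem hm]
        by_cases hv : nb ∈ v <;> simp [hv]
      · simp only [hm, if_neg, not_false_iff]
        by_cases hv : nb ∈ v <;> simp [hv]
    rw [hA]
    by_cases hv : nb ∈ v
    · rw [if_pos hv]; exact ih _ _ _
    · rw [if_neg hv]; exact ih _ _ _

-- loop1's done parameter is a pure accumulator
lemma loop1_acc (d : List (Int × List Int)) : ∀ (todo : List Int) (seen : PySem.Set Int) (done₁ done₂ : List Int),
    loop1 d todo seen (done₁ ++ done₂) = done₁ ++ loop1 d todo seen done₂ := by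
  intro todo seen done₁ done₂
  fun_induction loop1 d todo seen done₂ generalizing done₁ with
  | case1 => simp [loop1]
  | case2 seen done₂ node rest st ih =>
    rw [loop1.eq_def]
    simp only []
    rw [List.append_assoc done₁ done₂ [node]]
    exact ih done₁

-- main bridge: A's interleaved BFS = (pass 1 order) folded through pass 2
lemma loopA_eq (d : List (Int × List Int)) : ∀ (queue : List Int) (visited : PySem.Set Int)
    (finals : List Int) (out : PySem.Set Int) (edges : List String),
    loopA d queue visited finals out edges
      = ((loop1 d queue visited []).foldl (step2 d) (edges, finals, out)).2.2 := by
  intro queue visited finals out edges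
  fun_induction loopA d queue visited finals out edges with
  | case1 => simp [loop1]
  | case2 a b c e f g fo h ih =>
    have hg : (PySem.Dict.mk d).getD f [] = [] := by simp [PySem.Dict.getD, h]
    have hfo : fo = if f ∈ b then (c, b) else (PySem.Set.add c f, PySem.Set.add b f) := rfl
    have hl : loop1 d (f :: g) a [] = f :: loop1 d g a [] := by
      conv_lhs => rw [loop1.eq_def]
      simp only [hg, List.foldl_nil, List.nil_append]
      rw [show [f] = [f] ++ ([] : List Int) from by simp, loop1_acc]
      rfl
    rw [hl, List.foldl_cons]
    have hs : step2 d (e, b, c) f = (e, fo.2, fo.1) := by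
      unfold step2
      simp only [hg, List.foldl_nil, hfo]
      by_cases hf : f ∈ b <;> simp [hf]
    rw [hs]
    exact ih
  | case3 a b c e f g fo ns h st ih =>
    have hg : (PySem.Dict.mk d).getD f [] = ns := by simp [PySem.Dict.getD, h]
    have hfo : fo = if f ∈ b then (c, b) else (PySem.Set.add c f, PySem.Set.add b f) := rfl
    have hproj := foldA_proj f ns e a g
    have h1 : (ns.foldl stepB (a, g)).2 = st.2.2 := by rw [← hproj]
    have h2 : (ns.foldl stepB (a, g)).1 = st.2.1 := by rw [← hproj]
    have hl : loop1 d (f :: g) a [] = f :: loop1 d st.2.2 st.2.1 [] := by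
      conv_lhs => rw [loop1.eq_def]
      simp only [hg, List.nil_append, h1, h2]
      rw [show [f] = [f] ++ ([] : List Int) from by simp, loop1_acc]
      rfl
    rw [hl, List.foldl_cons]
    have hs : step2 d (e, b, c) f = (st.1, fo.2, fo.1) := by
      unfold step2
      simp only [hg, hfo, foldA_edge f ns e a g |>.symm]
      by_cases hf : f ∈ b <;> simp [hf] <;> rfl
    rw [hs]
    exact ih


-- ===== VERDICT (by name: the statement is the Claim_ definition above) =====
theorem getCFGInfluentEdgeLines_spec : Claim_equal_getCFGInfluentEdgeLines := by
  intro fw d fin ed _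
  unfold Spec_getCFGInfluentEdgeLines getCFGInfluentEdgeLines getCFGInfluentEdgeLines_alt
  simp only [List.nil_append]
  exact loopA_eq d fw (PySem.Set.union PySem.Set.empty fw) fin PySem.Set.empty ed
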